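-- pv_equiv track=rewrite | github.com/PatrykKobylanski/Yatzy | yatzy.py | readable_output_of_the_points
-- ===== SOURCE A (Python) =====
-- def readable_output_of_the_points(points, goal_len):
--     if points == "--":
--         return "--"
--     else:
--         if len(points) == goal_len:
--             return points
--         else:
--             r_points = points[::-1]
--             while len(r_points) < goal_len:
--                 r_points +=  "0"
--
--             return r_points[::-1]
-- ===== SOURCE B (Python) =====
-- def readable_output_of_the_points(points, goal_len):
--     if points == "--":
--         return "--"
--     return "0" * (goal_len - len(points)) + points
-- ===== Notes on version B (the rewrite author's own statement) =====
-- stated objective: simpler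
-- what changed: Replaces the reverse / while-append-zero / reverse-again loop (and the separate len==goal_len branch) with a single closed-form prepend of '0' * (goal_len - len(points)).
import Mathlib
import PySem

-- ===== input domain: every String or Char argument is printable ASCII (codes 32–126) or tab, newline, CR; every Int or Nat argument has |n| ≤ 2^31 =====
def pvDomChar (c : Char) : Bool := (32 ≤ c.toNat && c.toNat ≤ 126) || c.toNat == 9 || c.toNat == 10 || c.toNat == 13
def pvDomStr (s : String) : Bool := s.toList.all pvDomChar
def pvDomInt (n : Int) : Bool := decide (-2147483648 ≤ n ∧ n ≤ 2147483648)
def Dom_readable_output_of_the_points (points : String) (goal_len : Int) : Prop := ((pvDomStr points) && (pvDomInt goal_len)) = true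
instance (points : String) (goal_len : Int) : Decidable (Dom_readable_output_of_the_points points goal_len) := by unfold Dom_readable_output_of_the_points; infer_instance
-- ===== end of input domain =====

-- B replaces A's reverse / while-append-'0' / reverse-again loop by one closed-form prepend of the needed zeros; return value only, no side effects.

-- ===== PORT A =====
-- the 'while len(r_points) < goal_len: r_points += "0"' loop, verbatim over the same state
def pvPadLoopA (r_points : List Char) (goal_len : Int) : List Char :=
  if (r_points.length : Int) < goal_len then pvPadLoopA (r_points ++ ['0']) goal_len
  else r_points
termination_by (goal_len - r_points.length).toNat
decreasing_by simp; omega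

def readable_output_of_the_points (points : String) (goal_len : Int) : String :=
  if points = "--" then "--"
  else
    if (points.toList.length : Int) = goal_len then points
    else
      let r_points := points.toList.reverse          -- points[::-1]
      String.ofList (pvPadLoopA r_points goal_len).reverse -- loop, then r_points[::-1]

-- ===== PORT B =====
def readable_output_of_the_points_alt (points : String) (goal_len : Int) : String :=
  if points = "--" then "--"
  else String.ofList (List.replicate (goal_len - points.toList.length).toNat '0' ++ points.toList)
  -- "0" * (goal_len - len(points)) + points ; a negative count gives the empty string, as in Python

-- ===== PRECONDITION & SPEC =====
def Spec_readable_output_of_the_points (points : String) (goal_len : Int) (out : String) : Prop := out = readable_output_of_the_points_alt points goal_len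
instance (points : String) (goal_len : Int) (out : String) : Decidable (Spec_readable_output_of_the_points points goal_len out) := by unfold Spec_readable_output_of_the_points; infer_instance

-- ===== CLAIM (what is proved, stated in full; the proofs are below) =====
def Claim_equal_readable_output_of_the_points : Prop := ∀ (points : String) (goal_len : Int), Dom_readable_output_of_the_points points goal_len → Spec_readable_output_of_the_points points goal_len (readable_output_of_the_points points goal_len)

-- ===== LEMMAS AND PROOFS =====
theorem pvPadLoopA_eq (r : List Char) (g : Int) :
    pvPadLoopA r g = r ++ List.replicate (g - r.length).toNat '0' := by
  fun_induction pvPadLoopA r g with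
  | case1 r h ih =>
    rw [ih]
    have hk : (g - r.length).toNat = (g - (r ++ ['0']).length).toNat + 1 := by
      simp; omega
    rw [hk, List.replicate_succ]
    simp
  | case2 r h =>
    have : (g - r.length).toNat = 0 := by omega
    simp [this]

theorem readable_output_of_the_points_spec : Claim_equal_readable_output_of_the_points := by
  intro points goal_len _
  unfold Spec_readable_output_of_the_points readable_output_of_the_points readable_output_of_the_points_alt
  by_cases hd : points = "--"
  · simp [hd]
  · rw [if_neg hd, if_neg hd]
    by_cases he : (points.toList.length : Int) = goal_len
    · rw [if_pos he]
      have hlen : points.toList.length = points.length := String.length_toList ..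
      have h0 : goal_len.toNat - points.length = 0 := by omega
      simp [h0]
    · rw [if_neg he]
      show String.ofList (pvPadLoopA points.toList.reverse goal_len).reverse = _
      rw [pvPadLoopA_eq]
      simp

-- ===== VERDICT (by name: the statement is the Claim_ definition above) =====
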